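-- pv_equiv track=rewrite | github.com/tylkostudent/PBL | scripts/OLD/hex_generator.py | change_to_hex
-- ===== SOURCE A (Python) =====
-- def change_to_hex(number_string: str)->str:
--     binary_string = "00"
--     for char in number_string:
--         match char:
--             case "0":
--                 binary_string = binary_string + "00"
--             case "1":
--                 binary_string = binary_string + "01"
--             case "2":
--                 binary_string = binary_string + "10"
--             case "3":
--                 binary_string = binary_string + "11"
--     decimal_number = int(binary_string, 2)
--     hex_number = hex(decimal_number)[2:].zfill(2).upper()
--     return hex_number
-- ===== SOURCE B (Python) =====
-- def change_to_hex(number_string: str) -> str: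
--     acc = 0
--     for ch in number_string:
--         if ch in "0123":
--             acc = acc * 4 + (ord(ch) - ord("0"))
--         # any other character is silently ignored, as in the original
--     return format(acc, "X").zfill(2)
-- ===== Notes on version B (the rewrite author's own statement) =====
-- stated objective: simpler
-- what changed: Replaces the intermediate binary-string building and base-2 reparse with a single integer accumulator (acc = acc*4 + digit) formatted directly as zero-padded uppercase hex.
import Mathlib
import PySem

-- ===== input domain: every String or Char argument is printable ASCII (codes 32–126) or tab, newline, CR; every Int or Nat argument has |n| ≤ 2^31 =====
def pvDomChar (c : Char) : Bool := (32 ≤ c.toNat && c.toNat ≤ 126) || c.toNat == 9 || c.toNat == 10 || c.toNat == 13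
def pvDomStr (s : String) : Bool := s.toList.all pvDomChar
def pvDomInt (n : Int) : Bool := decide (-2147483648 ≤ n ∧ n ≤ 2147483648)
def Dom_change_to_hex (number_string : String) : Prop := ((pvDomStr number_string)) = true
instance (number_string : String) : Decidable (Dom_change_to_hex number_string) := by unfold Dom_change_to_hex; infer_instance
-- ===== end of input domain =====

-- B replaces A's binary-string building and base-2 reparse by one integer accumulator (acc = acc*4 + digit)
-- formatted directly as zero-padded uppercase hex: simpler, one pass, no intermediate string.

-- ===== PORT A =====

-- hex(n) for n ≥ 0 (the only case A reaches): "0x" followed by the lowercase hex digits; exact there.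
def pyHexDigit (d : Nat) : Char := if d < 10 then Char.ofNat (48 + d) else Char.ofNat (87 + d)

def pyHexCore (n : Nat) : List Char :=
  if h : n = 0 then [] else pyHexCore (n / 16) ++ [pyHexDigit (n % 16)]
decreasing_by exact Nat.div_lt_self (Nat.pos_of_ne_zero h) (by omega)

def pyHex (n : Nat) : List Char := '0' :: 'x' :: (if n = 0 then ['0'] else pyHexCore n)

-- int(s, 2): binary_string is by construction a nonempty string of '0'/'1' characters
-- (no sign, whitespace, underscore or prefix), on which int(s, 2) is exactly this left fold.
def parseBin2 (cs : List Char) : Nat := cs.foldl (fun a c => 2 * a + (if c = '1' then 1 else 0)) 0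

def change_to_hex (number_string : String) : String :=
  let binary_string := number_string.toList.foldl (fun bs c =>
    if c = '0' then bs ++ ['0', '0']
    else if c = '1' then bs ++ ['0', '1']
    else if c = '2' then bs ++ ['1', '0']
    else if c = '3' then bs ++ ['1', '1']
    else bs) ['0', '0']
  let decimal_number := parseBin2 binary_string
  let hex_number :=
    PySem.Chars.upper (PySem.Chars.zfill (PySem.List.slice (pyHex decimal_number) (some 2) none) 2)
  String.ofList hex_number

-- ===== PORT B =====

-- format(n, 'X') for n ≥ 0: the uppercase hex digits ("0" for zero); exact there.
def hexDigitU (d : Nat) : Char := if d < 10 then Char.ofNat (48 + d) else Char.ofNat (55 + d)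

def formatXCore (n : Nat) : List Char :=
  if h : n = 0 then [] else formatXCore (n / 16) ++ [hexDigitU (n % 16)]
decreasing_by exact Nat.div_lt_self (Nat.pos_of_ne_zero h) (by omega)

def formatX (n : Nat) : List Char := if n = 0 then ['0'] else formatXCore n

def change_to_hex_alt (number_string : String) : String :=
  let acc := number_string.toList.foldl (fun a c =>
    if c ∈ ['0', '1', '2', '3'] then 4 * a + (c.toNat - 48) else a) 0
  String.ofList (PySem.Chars.zfill (formatX acc) 2)

-- ===== PRECONDITION & SPEC =====
def Spec_change_to_hex (number_string : String) (out : String) : Prop := out = change_to_hex_alt number_string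
instance (number_string : String) (out : String) : Decidable (Spec_change_to_hex number_string out) := by unfold Spec_change_to_hex; infer_instance

-- ===== CLAIM (what is proved, stated in full; the proofs are below) =====
def Claim_equal_change_to_hex : Prop := ∀ (number_string : String), Dom_change_to_hex number_string → Spec_change_to_hex number_string (change_to_hex number_string)

-- ===== LEMMAS AND PROOFS =====

-- The accumulator values agree: parsing A's binary string equals B's base-4 fold.
lemma parseBin2_append (bs cs : List Char) :
    parseBin2 (bs ++ cs) = cs.foldl (fun a c => 2 * a + (if c = '1' then 1 else 0)) (parseBin2 bs) := by
  simp [parseBin2, List.foldl_append]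

-- each matched digit contributes acc ↦ 4*acc + digit; other characters leave both sides unchanged
lemma acc_agree (l : List Char) (bs : List Char) :
    parseBin2 (l.foldl (fun bs c =>
      if c = '0' then bs ++ ['0', '0']
      else if c = '1' then bs ++ ['0', '1']
      else if c = '2' then bs ++ ['1', '0']
      else if c = '3' then bs ++ ['1', '1']
      else bs) bs)
    = l.foldl (fun a c => if c ∈ ['0', '1', '2', '3'] then 4 * a + (c.toNat - 48) else a)
        (parseBin2 bs) := by
  induction l generalizing bs with
  | nil => rfl
  | cons c rest ih =>
    simp only [List.foldl_cons]
    by_cases h0 : c = '0'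
    · subst h0; rw [ih]; congr 1
      simp [parseBin2_append, List.foldl_cons, List.foldl_nil]
      omega
    by_cases h1 : c = '1'
    · subst h1; rw [ih]; congr 1
      simp [parseBin2_append, List.foldl_cons, List.foldl_nil]
      omega
    by_cases h2 : c = '2'
    · subst h2; rw [ih]; congr 1
      simp [parseBin2_append, List.foldl_cons, List.foldl_nil]
      omega
    by_cases h3 : c = '3'
    · subst h3; rw [ih]; congr 1
      simp [parseBin2_append, List.foldl_cons, List.foldl_nil]
      omega
    rw [if_neg h0, if_neg h1, if_neg h2, if_neg h3, ih]
    congr 1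
    simp [h0, h1, h2, h3]

lemma upperChar_pyHexDigit (d : Nat) (hd : d < 16) :
    PySem.Chars.upperChar (pyHexDigit d) = hexDigitU d := by
  interval_cases d <;> decide

lemma upper_pyHexCore (n : Nat) :
    List.map PySem.Chars.upperChar (pyHexCore n) = formatXCore n := by
  induction n using pyHexCore.induct with
  | case1 => simp [pyHexCore, formatXCore]
  | case2 n hn ih =>
    rw [pyHexCore, formatXCore]
    simp only [hn, dite_false, List.map_append, List.map_cons, List.map_nil, ih,
      upperChar_pyHexDigit (n % 16) (Nat.mod_lt _ (by omega))]

lemma upper_hexBody (n : Nat) :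
    List.map PySem.Chars.upperChar (if n = 0 then ['0'] else pyHexCore n) = formatX n := by
  unfold formatX
  split_ifs with h
  · decide
  · exact upper_pyHexCore n

lemma hexDigitU_not_sign (d : Nat) (hd : d < 16) : hexDigitU d ≠ '+' ∧ hexDigitU d ≠ '-' := by
  interval_cases d <;> decide

lemma formatXCore_head_not_sign (n : Nat) :
    ∀ c rest, formatXCore n = c :: rest → ¬ (c = '+' ∨ c = '-') := by
  induction n using formatXCore.induct with
  | case1 => intro c rest h; rw [formatXCore] at h; simp at h
  | case2 n hn ih =>
    intro c rest h
    rw [formatXCore] at h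
    simp only [hn, dite_false] at h
    rcases hrest : formatXCore (n / 16) with _ | ⟨c', rest'⟩
    · rw [hrest] at h
      simp only [List.nil_append, List.cons.injEq] at h
      have hns := hexDigitU_not_sign (n % 16) (Nat.mod_lt _ (by omega))
      rintro (rfl | rfl)
      · exact hns.1 h.1
      · exact hns.2 h.1
    · rw [hrest] at h
      simp only [List.cons_append, List.cons.injEq] at h
      exact h.1 ▸ ih c' rest' hrest

lemma formatX_head_not_sign (n : Nat) (c : Char) (rest : List Char)
    (h : formatX n = c :: rest) : ¬ (c = '+' ∨ c = '-') := by
  unfold formatX at h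
  split_ifs at h with h0
  · simp only [List.cons.injEq] at h
    rintro (rfl | rfl) <;> simp at h
  · exact formatXCore_head_not_sign n c rest h

-- A's "zfill then upper" equals B's "uppercase digits then zfill" on sign-free digit lists.
lemma upper_zfill_eq (ds : List Char)
    (hhead : ∀ c rest, ds = c :: rest → ¬ (c = '+' ∨ c = '-'))
    (hheadU : ∀ c rest, List.map PySem.Chars.upperChar ds = c :: rest → ¬ (c = '+' ∨ c = '-')) :
    PySem.Chars.upper (PySem.Chars.zfill ds 2)
      = PySem.Chars.zfill (List.map PySem.Chars.upperChar ds) 2 := by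
  unfold PySem.Chars.zfill PySem.Chars.upper
  rcases ds with _ | ⟨c, rest⟩
  · decide
  · have hc := hhead c rest rfl
    have hcU := hheadU (PySem.Chars.upperChar c) (List.map PySem.Chars.upperChar rest) rfl
    simp only [List.length_map, List.length_cons, List.map_cons]
    by_cases hlen : (2 : Int) ≤ (rest.length + 1 : Nat)
    · rw [if_pos hlen, if_pos hlen]
      rfl
    · rw [if_neg hlen, if_neg hlen, if_neg hc, if_neg hcU]
      simp [List.map_append, List.map_replicate,
        show PySem.Chars.upperChar '0' = '0' from by decide]

lemma slice_two (a b : Char) (rest : List Char) :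
    PySem.List.slice (a :: b :: rest) (some 2) none = rest := by
  simp [PySem.List.slice, PySem.List.clampIdx]

-- ===== VERDICT (by name: the statement is the Claim_ definition above) =====
theorem change_to_hex_spec : Claim_equal_change_to_hex := by
  intro s _
  unfold Spec_change_to_hex
  simp only [change_to_hex, change_to_hex_alt]
  have hacc := acc_agree s.toList ['0', '0']
  have h0 : parseBin2 ['0', '0'] = 0 := by decide
  rw [h0] at hacc
  rw [hacc]
  set n := s.toList.foldl (fun a c => if c ∈ ['0', '1', '2', '3'] then 4 * a + (c.toNat - 48) else a) 0 with hn
  simp only [pyHex, slice_two]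
  congr 1
  have hb := upper_hexBody n
  rw [upper_zfill_eq _ ?_ ?_, hb]
  · -- the lowercase hex body never starts with a sign character
    intro c rest hds
    by_cases h : n = 0
    · rw [if_pos h] at hds
      simp only [List.cons.injEq] at hds
      rintro (rfl | rfl) <;> simp at hds
    · rw [if_neg h] at hds
      have hmap : formatXCore n = PySem.Chars.upperChar c :: List.map PySem.Chars.upperChar rest := by
        rw [← upper_pyHexCore n, hds, List.map_cons]
      have hns := formatXCore_head_not_sign n _ _ hmap
      rintro (rfl | rfl)
      · exact hns (Or.inl (by decide))
      · exact hns (Or.inr (by decide))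
  · intro c rest hds
    rw [hb] at hds
    exact formatX_head_not_sign n c rest hds
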